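-- pv_equiv track=rewrite | github.com/fls-bioinformatics-core/GFFUtils | GFFUtils/annotation.py | build_description_text
-- ===== SOURCE A (Python) =====
-- def build_description_text(attributes):
--     """
--     Build description text from gene attributes data
--
--     This is all attribute data from the 'description'
--     attribute onwards
--     """
--     store_attribute = False
--     description = []
--     for attr in attributes:
--         if store_attribute:
--             description.append(attr+'='+attributes[attr])
--         if attr == 'description':
--             description.append(attributes[attr])
--             store_attribute = True
--     # Reconstruct the description string
--     description = ';'.join(description)
--     # Finally: replace any tab characters that were introduced
--     # by % decoding
--     return description.replace('\t','    ')
-- ===== SOURCE B (Python) =====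
-- def build_description_text(attributes):
--     """
--     Build description text from gene attributes data
--
--     This is all attribute data from the 'description'
--     attribute onwards
--     """
--     parts = []
--     for key in reversed(list(attributes)):
--         if key == 'description':
--             return ';'.join([attributes[key]] + parts[::-1]).replace('\t', '    ')
--         parts.append(key + '=' + attributes[key])
--     return ''
-- ===== Notes on version B (the rewrite author's own statement) =====
-- stated objective: alternative
-- what changed: B walks the keys right-to-left accumulating 'k=v' parts and returns immediately on reaching the 'description' marker (discarding the accumulator if the marker is absent), instead of A's forward pass carrying a boolean seen-flag; Pre_ excludes association lists with duplicate keys, which do not correspond to any Python dict input (dict construction collapses duplicates).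
import Mathlib
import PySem

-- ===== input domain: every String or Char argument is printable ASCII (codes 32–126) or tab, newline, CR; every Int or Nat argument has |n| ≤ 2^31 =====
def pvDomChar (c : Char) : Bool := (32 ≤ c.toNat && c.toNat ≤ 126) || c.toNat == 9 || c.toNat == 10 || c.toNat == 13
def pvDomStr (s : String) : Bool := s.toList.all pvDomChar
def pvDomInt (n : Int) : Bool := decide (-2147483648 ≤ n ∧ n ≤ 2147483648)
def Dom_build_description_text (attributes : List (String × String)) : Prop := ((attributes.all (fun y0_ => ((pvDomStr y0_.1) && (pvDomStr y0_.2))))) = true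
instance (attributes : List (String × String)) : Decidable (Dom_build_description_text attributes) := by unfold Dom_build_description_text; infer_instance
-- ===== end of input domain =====

-- B replaces A's forward flag-carrying pass with a right-to-left walk that accumulates
-- 'k=v' parts and returns early at the 'description' marker (alternative decomposition).

-- ===== PORT A =====
-- literal transliteration of A: fold over the keys carrying (store_attribute, description)
def build_description_text (attributes : List (String × String)) : String :=
  let st := attributes.foldl
    (fun (st : Bool × List String) attr =>
      let st := if st.1 then (st.1, st.2 ++ [attr.1 ++ "=" ++ PySem.Dict.getD (PySem.Dict.ofList attributes) attr.1 ""]) else st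
      if attr.1 == "description" then (true, st.2 ++ [PySem.Dict.getD (PySem.Dict.ofList attributes) attr.1 ""]) else st)
    (false, [])
  PySem.Str.replace (PySem.Str.join ";" st.2) "\t" "    "

-- ===== PORT B =====
-- transliteration of Source B: recursion over reversed keys with accumulator 'parts',
-- early return at 'description' ('parts[::-1]' ported as List.reverse), '' if exhausted
def bdtGo (dsrc : List (String × String)) : List String → List String → String
  | [], _parts => ""
  | key :: rest, parts =>
    if key == "description" then
      PySem.Str.replace
        (PySem.Str.join ";" (PySem.Dict.getD (PySem.Dict.ofList dsrc) key "" :: parts.reverse))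
        "\t" "    "
    else
      bdtGo dsrc rest (parts ++ [key ++ "=" ++ PySem.Dict.getD (PySem.Dict.ofList dsrc) key ""])

def build_description_text_alt (attributes : List (String × String)) : String :=
  bdtGo attributes ((attributes.map Prod.fst).reverse) []

-- ===== PRECONDITION & SPEC =====
-- Pre_ excludes association lists with duplicate keys: those do not correspond to any Python
-- dict input (dict construction collapses duplicates), so A's behaviour there is undefined.
def Pre_build_description_text (attributes : List (String × String)) : Prop :=
  (attributes.map Prod.fst).Nodup
instance (attributes : List (String × String)) : Decidable (Pre_build_description_text attributes) := by
  unfold Pre_build_description_text; infer_instance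

def pvWitness_build_description_text : (List (String × String)) :=
  [("a", "1"), ("description", "v"), ("b", "2")]

def Spec_build_description_text (attributes : List (String × String)) (out : String) : Prop := out = build_description_text_alt attributes
instance (attributes : List (String × String)) (out : String) : Decidable (Spec_build_description_text attributes out) := by unfold Spec_build_description_text; infer_instance

-- ===== CLAIM (what is proved, stated in full; the proofs are below) =====
def Claim_equal_build_description_text : Prop := ∀ (attributes : List (String × String)), Dom_build_description_text attributes → Pre_build_description_text attributes → Spec_build_description_text attributes (build_description_text attributes)

-- ===== LEMMAS AND PROOFS =====

-- A's loop before 'description' is seen: nothing is accumulated, the flag stays false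
theorem foldA_false (dsrc : List (String × String)) (l : List (String × String))
    (h : ∀ p ∈ l, p.1 ≠ "description") :
    l.foldl
      (fun (st : Bool × List String) attr =>
        let st := if st.1 then (st.1, st.2 ++ [attr.1 ++ "=" ++ PySem.Dict.getD (PySem.Dict.ofList dsrc) attr.1 ""]) else st
        if attr.1 == "description" then (true, st.2 ++ [PySem.Dict.getD (PySem.Dict.ofList dsrc) attr.1 ""]) else st)
      (false, []) = (false, []) := by
  induction l with
  | nil => rfl
  | cons p l ih =>
    have hp : p.1 ≠ "description" := h p (by simp)
    simp only [List.foldl_cons, Bool.false_eq_true, if_false,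
      if_neg (show ¬ (p.1 == "description") = true by simp [hp])]
    exact ih (fun q hq => h q (List.mem_cons_of_mem _ hq))

-- A's loop after 'description' was seen: every remaining pair is appended as k=v
theorem foldA_true (dsrc : List (String × String)) (l : List (String × String))
    (h : ∀ p ∈ l, p.1 ≠ "description") (acc : List String) :
    l.foldl
      (fun (st : Bool × List String) attr =>
        let st := if st.1 then (st.1, st.2 ++ [attr.1 ++ "=" ++ PySem.Dict.getD (PySem.Dict.ofList dsrc) attr.1 ""]) else st
        if attr.1 == "description" then (true, st.2 ++ [PySem.Dict.getD (PySem.Dict.ofList dsrc) attr.1 ""]) else st)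
      (true, acc)
    = (true, acc ++ l.map (fun p => p.1 ++ "=" ++ PySem.Dict.getD (PySem.Dict.ofList dsrc) p.1 "")) := by
  induction l generalizing acc with
  | nil => simp
  | cons p l ih =>
    have hp : p.1 ≠ "description" := h p (by simp)
    simp only [List.foldl_cons, if_true,
      if_neg (show ¬ (p.1 == "description") = true by simp [hp])]
    rw [ih (fun q hq => h q (List.mem_cons_of_mem _ hq))]
    simp

-- B's recursion exhausting keys without seeing 'description' returns ''
theorem bdtGo_none (dsrc : List (String × String)) (ks : List String)
    (h : ∀ k ∈ ks, k ≠ "description") (parts : List String) :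
    bdtGo dsrc ks parts = "" := by
  induction ks generalizing parts with
  | nil => rfl
  | cons k ks ih =>
    have hk : k ≠ "description" := h k (by simp)
    simp only [bdtGo, if_neg (show ¬ (k == "description") = true by simp [hk])]
    exact ih (fun q hq => h q (List.mem_cons_of_mem _ hq)) _

-- B's recursion over a prefix free of 'description' just accumulates k=v parts
theorem bdtGo_acc (dsrc : List (String × String)) (ks : List String)
    (h : ∀ k ∈ ks, k ≠ "description") (rest : List String) (parts : List String) :
    bdtGo dsrc (ks ++ rest) parts
      = bdtGo dsrc rest (parts ++ ks.map (fun k => k ++ "=" ++ PySem.Dict.getD (PySem.Dict.ofList dsrc) k "")) := by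
  induction ks generalizing parts with
  | nil => simp
  | cons k ks ih =>
    have hk : k ≠ "description" := h k (by simp)
    simp only [List.cons_append, bdtGo,
      if_neg (show ¬ (k == "description") = true by simp [hk])]
    rw [ih (fun q hq => h q (List.mem_cons_of_mem _ hq))]
    simp

-- first-occurrence split of a list whose keys contain 'description'
theorem first_split (l : List (String × String))
    (hmem : "description" ∈ l.map Prod.fst) :
    ∃ l1 d l2, l = l1 ++ (d : String × String) :: l2 ∧ d.1 = "description" ∧
      ∀ p ∈ l1, (p : String × String).1 ≠ "description" := by
  induction l with
  | nil => simp at hmem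
  | cons q qs ih =>
    by_cases hq : q.1 = "description"
    · exact ⟨[], q, qs, by simp, hq, by simp⟩
    · have hmem' : "description" ∈ qs.map Prod.fst := by
        rcases List.mem_map.1 hmem with ⟨r, hr, hr1⟩
        rcases List.mem_cons.1 hr with hr | hr
        · exact absurd (hr ▸ hr1) hq
        · exact hr1 ▸ List.mem_map_of_mem hr
      rcases ih hmem' with ⟨l1, d, l2, h1, h2, h3⟩
      refine ⟨q :: l1, d, l2, by simp [h1], h2, ?_⟩
      intro r hr
      rcases List.mem_cons.1 hr with hr | hr
      · exact hr ▸ hq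
      · exact h3 r hr

theorem build_description_text_spec_aux (attributes : List (String × String))
    (hnd : Pre_build_description_text attributes) :
    build_description_text attributes = build_description_text_alt attributes := by
  unfold Pre_build_description_text at hnd
  by_cases hmem : "description" ∈ attributes.map Prod.fst
  · obtain ⟨l1, d, l2, hattr, hdesc, hpre⟩ := first_split attributes hmem
    subst hattr
    have hnodup := hnd
    rw [List.map_append, List.map_cons, hdesc, List.nodup_append] at hnodup
    have hsuf : ∀ p ∈ l2, (p : String × String).1 ≠ "description" := by
      intro p hp hcontra
      exact (List.nodup_cons.1 hnodup.2.1).1 (hcontra ▸ List.mem_map_of_mem hp)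
    have hsufk : ∀ k ∈ ((l2.map Prod.fst).reverse : List String), k ≠ "description" := by
      intro k hk
      rcases List.mem_map.1 (List.mem_reverse.1 hk) with ⟨p, hp, hp1⟩
      exact hp1 ▸ hsuf p hp
    -- A side
    unfold build_description_text
    rw [List.foldl_append, foldA_false (l1 ++ d :: l2) l1 hpre, List.foldl_cons]
    simp only [Bool.false_eq_true, if_false,
      if_pos (show (d.1 == "description") = true by simp [hdesc])]
    rw [foldA_true (l1 ++ d :: l2) l2 hsuf]
    -- B side
    have hrev : ((l1 ++ d :: l2).map Prod.fst).reverse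
        = (l2.map Prod.fst).reverse ++ "description" :: (l1.map Prod.fst).reverse := by
      simp [hdesc]
    unfold build_description_text_alt
    rw [hrev, bdtGo_acc _ _ hsufk]
    rw [show ∀ parts, bdtGo (l1 ++ d :: l2) ("description" :: (l1.map Prod.fst).reverse) parts
        = PySem.Str.replace (PySem.Str.join ";"
            (PySem.Dict.getD (PySem.Dict.ofList (l1 ++ d :: l2)) "description" "" :: parts.reverse))
            "\t" "    "
      from fun parts => by simp [bdtGo]]
    simp [hdesc, List.map_reverse, List.map_map, Function.comp_def]
  · have hno : ∀ p ∈ attributes, p.1 ≠ "description" := by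
      intro p hp hcontra
      exact hmem (hcontra ▸ List.mem_map_of_mem hp)
    have hnok : ∀ k ∈ ((attributes.map Prod.fst).reverse : List String), k ≠ "description" := by
      intro k hk
      rcases List.mem_map.1 (List.mem_reverse.1 hk) with ⟨p, hp, hp1⟩
      exact hp1 ▸ hno p hp
    unfold build_description_text build_description_text_alt
    rw [foldA_false attributes attributes hno, bdtGo_none attributes _ hnok]
    decide

-- ===== VERDICT (by name: the statement is the Claim_ definition above) =====
theorem build_description_text_spec : Claim_equal_build_description_text := by
  intro attributes _ hpre
  unfold Spec_build_description_text
  exact build_description_text_spec_aux attributes hpre
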